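-- pv_equiv track=rewrite | github.com/hiepnm93/pyshopee | util.py | splitPage
-- ===== SOURCE A (Python) =====
-- def splitPage(page, limit = 30):
--     if (page < limit):
--         return[(0, page-1)]
--     k = 1
--     if page - ((page //limit))*limit > 0:
--         k = 0
--
--     n = (page //limit) + 1 - k
--     listReturn = list()
--
--     for x in range(n):# 1 -> 0 ,29
--         if x == n-1:
--             listReturn.append((limit*(x), page - 1))
--         else :
--             listReturn.append((limit*(x), limit*(x+1)-1))
--     return listReturn
-- ===== SOURCE B (Python) =====
-- def splitPage(page, limit = 30):
--     if page < limit: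
--         return [(0, page - 1)]
--     # Build the chunk list back-to-front: walk the chunk starts downward from the
--     # start of the chunk containing page-1 (largest multiple of limit <= page-1),
--     # carrying each chunk's end, then reverse.  No chunk count, no last-chunk case.
--     out = []
--     end = page - 1
--     for s in range((page - 1) // limit * limit, 0, -limit):
--         out.append((s, end))
--         end = s - 1
--     out.append((0, end))
--     out.reverse()
--     return out
-- ===== Notes on version B (the rewrite author's own statement) =====
-- stated objective: alternative
-- what changed: B drops A's ceiling-count computation (q, k, n) and the indexed forward loop with its last-iteration branch: it builds the chunk list back-to-front, walking the chunk starts downward from the largest multiple of limit below page while carrying each chunk's end, then reverses.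
-- outside the precondition, e.g. on splitPage(7, -3): A returns [], B returns [(0, 6)]; on splitPage(0, -2): A returns [], B returns [(0, -1)]
import Mathlib
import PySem

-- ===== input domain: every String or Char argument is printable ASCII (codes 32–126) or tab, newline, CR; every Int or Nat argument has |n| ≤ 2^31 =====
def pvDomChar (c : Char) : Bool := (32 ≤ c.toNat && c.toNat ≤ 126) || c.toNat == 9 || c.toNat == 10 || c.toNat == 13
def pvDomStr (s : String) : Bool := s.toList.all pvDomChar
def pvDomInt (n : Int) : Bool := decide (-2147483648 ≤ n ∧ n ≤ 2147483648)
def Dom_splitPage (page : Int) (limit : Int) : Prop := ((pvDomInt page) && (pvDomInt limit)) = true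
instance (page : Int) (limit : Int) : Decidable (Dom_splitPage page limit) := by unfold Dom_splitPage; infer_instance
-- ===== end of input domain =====

-- B replaces A's ceiling-count (q, k, n) and indexed forward loop with its last-iteration
-- branch by a back-to-front construction: walk the chunk starts downward carrying each
-- chunk's end, then reverse (alternative decomposition, same cost).


-- ===== PORT A =====
def splitPage (page : Int) (limit : Int) : List (Int × Int) :=
  if page < limit then [(0, page - 1)]
  else
    let k : Int := if page - (PySem.Int.floordiv page limit) * limit > 0 then 0 else 1
    let n : Int := PySem.Int.floordiv page limit + 1 - k
    (PySem.List.pyRange 0 n 1).foldl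
      (fun acc x =>
        if x == n - 1 then acc ++ [(limit * x, page - 1)]
        else acc ++ [(limit * x, limit * (x + 1) - 1)]) []

-- ===== PORT B =====
def splitPage_alt (page : Int) (limit : Int) : List (Int × Int) :=
  if page < limit then [(0, page - 1)]
  else
    let r := (PySem.List.pyRange (PySem.Int.floordiv (page - 1) limit * limit) 0 (-limit)).foldl
      (fun (st : List (Int × Int) × Int) s => (st.1 ++ [(s, st.2)], s - 1)) ([], page - 1)
    (r.1 ++ [(0, r.2)]).reverse

-- ===== PRECONDITION & SPEC =====
-- Pre_ excludes nonpositive limit with page ≥ limit (a meaningless chunk size):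
-- there A raises ZeroDivisionError (limit = 0) or returns accidental floor-division
-- artefacts (limit < 0), where B's downward walk naturally yields a different value.
def Pre_splitPage (page : Int) (limit : Int) : Prop := 0 < limit ∨ page < limit
instance (page : Int) (limit : Int) : Decidable (Pre_splitPage page limit) := by unfold Pre_splitPage; infer_instance
def pvWitness_splitPage : Int × Int := (65, 30)

def Spec_splitPage (page : Int) (limit : Int) (out : List (Int × Int)) : Prop := out = splitPage_alt page limit
instance (page : Int) (limit : Int) (out : List (Int × Int)) : Decidable (Spec_splitPage page limit out) := by unfold Spec_splitPage; infer_instance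

-- ===== CLAIM (what is proved, stated in full; the proofs are below) =====
def Claim_equal_splitPage : Prop := ∀ (page : Int) (limit : Int), Dom_splitPage page limit → Pre_splitPage page limit → Spec_splitPage page limit (splitPage page limit)

-- ===== LEMMAS AND PROOFS =====

-- B's descending stepped range, written out: the starts Mn*limit, (Mn-1)*limit, …, 1*limit.
lemma pyRange_down (limit : Int) (hl : 0 < limit) (Mn : Nat) :
    PySem.List.pyRange ((Mn : Int) * limit) 0 (-limit)
      = (List.range Mn).map (fun (k : Nat) => ((Mn : Int) - (k : Int)) * limit) := by
  unfold PySem.List.pyRange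
  rw [if_neg (by omega : ¬ -limit = 0), if_neg (by omega : ¬ (0:Int) < -limit)]
  rcases Nat.eq_zero_or_pos Mn with h0 | hpos
  · subst h0; norm_num
  · have hst : (0:Int) < (Mn : Int) * limit := by positivity
    rw [if_pos hst]
    simp only [neg_neg]
    have hcnt : (((Mn : Int) * limit - 0 + limit - 1) / limit).toNat = Mn := by
      have h1 : ((Mn : Int) * limit - 0 + limit - 1) = ((Mn : Int) + 1) * limit - 1 := by ring
      have h2 : (((Mn : Int) + 1) * limit - 1) / limit = (Mn : Int) := by
        rw [← PySem.Int.floordiv_eq_ediv_of_pos hl, PySem.Int.floordiv_eq_iff_of_pos hl]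
        constructor <;> nlinarith
      rw [h1, h2]; omega
    rw [hcnt]
    apply List.map_congr_left
    intro k _
    ring

-- B's fold over those starts, characterised: it appends the chunks top-down
-- (the first gets the carried end e) and ends carrying limit - 1.
lemma foldB (limit : Int) : ∀ (Mn : Nat) (acc : List (Int × Int)) (e : Int),
    ((List.range Mn).map (fun (k : Nat) => ((Mn : Int) - (k : Int)) * limit)).foldl
      (fun (st : List (Int × Int) × Int) s => (st.1 ++ [(s, st.2)], s - 1)) (acc, e)
    = (acc ++ ((List.range Mn).map
          (fun (j : Nat) => if j + 1 = Mn then (((j : Int) + 1) * limit, e)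
                    else (((j : Int) + 1) * limit, ((j : Int) + 2) * limit - 1))).reverse,
       if Mn = 0 then e else limit - 1) := by
  intro Mn
  induction Mn with
  | zero => intro acc e; simp
  | succ m ih =>
    intro acc e
    conv_lhs => rw [List.range_succ_eq_map]
    rw [List.map_cons, List.foldl_cons, List.map_map]
    have htail : (List.range m).map ((fun (k : Nat) => ((m : Int) + 1 - (k : Int)) * limit) ∘ Nat.succ)
        = (List.range m).map (fun (k : Nat) => ((m : Int) - (k : Int)) * limit) := by
      apply List.map_congr_left; intro k _
      simp only [Function.comp_apply]; push_cast; ring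
    simp only [Nat.cast_add, Nat.cast_one] at htail ⊢
    rw [htail, ih]
    have hP : (List.range m).map
          (fun (j : Nat) => if j + 1 = m then (((j : Int) + 1) * limit, ((m : Int) + 1 - ((0 : Nat) : Int)) * limit - 1)
                    else (((j : Int) + 1) * limit, ((j : Int) + 2) * limit - 1))
        = (List.range m).map
          (fun (j : Nat) => (((j : Int) + 1) * limit, ((j : Int) + 2) * limit - 1)) := by
      apply List.map_congr_left; intro j hj
      by_cases hje : j + 1 = m
      · rw [if_pos hje]
        have hm : ((m : Int)) = ((j : Int) + 1) := by
          have := congrArg (fun (t : Nat) => ((t : Int))) hje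
          push_cast at this
          omega
        rw [hm]
        exact congrArg (fun t => ((((j : Int)) + 1) * limit, t)) (by ring)
      · rw [if_neg hje]
    rw [hP]
    have hQ : (List.range (m + 1)).map
          (fun (j : Nat) => if j + 1 = m + 1 then (((j : Int) + 1) * limit, e)
                    else (((j : Int) + 1) * limit, ((j : Int) + 2) * limit - 1))
        = (List.range m).map
            (fun (j : Nat) => (((j : Int) + 1) * limit, ((j : Int) + 2) * limit - 1))
          ++ [(((m : Int) + 1) * limit, e)] := by
      rw [List.range_succ, List.map_append]
      congr 1
      · apply List.map_congr_left; intro j hj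
        rw [if_neg (by have := List.mem_range.mp hj; omega)]
      · simp
    rw [hQ, List.reverse_append]
    simp only [Prod.mk.injEq]
    constructor
    · have hc : ((m : Int) + 1 - ((0 : Nat) : Int)) * limit = ((m : Int) + 1) * limit := by
        push_cast; ring
      rw [hc]
      simp [List.append_assoc]
    · rw [if_neg (by omega : ¬ m + 1 = 0)]
      rcases Nat.eq_zero_or_pos m with h0 | hpos
      · subst h0; norm_num
      · rw [if_neg (by omega)]

-- A's loop as a map over its range.
lemma splitPageA_map (page limit n : Int) :
    (PySem.List.pyRange 0 n 1).foldl
      (fun acc x =>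
        if x == n - 1 then acc ++ [(limit * x, page - 1)]
        else acc ++ [(limit * x, limit * (x + 1) - 1)]) []
    = (PySem.List.pyRange 0 n 1).map
        (fun x => if x == n - 1 then (limit * x, page - 1)
                  else (limit * x, limit * (x + 1) - 1)) := by
  rw [show (fun (acc : List (Int × Int)) (x : Int) =>
        if x == n - 1 then acc ++ [(limit * x, page - 1)]
        else acc ++ [(limit * x, limit * (x + 1) - 1)])
      = (fun (acc : List (Int × Int)) x => acc ++
          [if x == n - 1 then (limit * x, page - 1)
           else (limit * x, limit * (x + 1) - 1)]) from by
    funext acc x; split <;> rfl]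
  rw [PySem.List.foldl_append_singleton_eq_map]
  rfl

-- ===== VERDICT (by name: the statement is the Claim_ definition above) =====
theorem splitPage_spec : Claim_equal_splitPage := by
  intro page limit _ hpre
  unfold Spec_splitPage splitPage splitPage_alt
  by_cases hlt : page < limit
  · simp [hlt]
  · have hl : 0 < limit := by rcases hpre with h | h <;> omega
    have hp : limit ≤ page := by omega
    simp only [if_neg hlt]
    set q := PySem.Int.floordiv page limit with hqdef
    set k : Int := if page - q * limit > 0 then (0:Int) else 1 with hkdef
    set n : Int := q + 1 - k with hndef
    set M := PySem.Int.floordiv (page - 1) limit with hMdef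
    have hmod : q * limit + PySem.Int.mod page limit = page := by
      rw [hqdef]; exact PySem.Int.floordiv_mul_add_mod page limit
    have hr0 := PySem.Int.mod_nonneg page hl
    have hrl := PySem.Int.mod_lt page hl
    have hq1 : 1 ≤ q := by
      rw [hqdef, PySem.Int.le_floordiv_iff_mul_le hl]
      omega
    have hnM : n = M + 1 := by
      rw [hndef, hkdef, hMdef]
      have hx1 : (q + 1) * limit = q * limit + limit := by ring
      by_cases hr : page - q * limit > 0
      · rw [if_pos hr]
        have : PySem.Int.floordiv (page - 1) limit = q := by
          rw [PySem.Int.floordiv_eq_iff_of_pos hl]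
          omega
        omega
      · rw [if_neg hr]
        have hx2 : (q - 1 + 1) * limit = q * limit := by ring
        have : PySem.Int.floordiv (page - 1) limit = q - 1 := by
          rw [PySem.Int.floordiv_eq_iff_of_pos hl]
          have hx3 : (q - 1) * limit = q * limit - limit := by ring
          omega
        omega
    have hM0 : 0 ≤ M := by omega
    have hMcast : M = ((M.toNat : Int)) := by omega
    set Mn := M.toNat with hMn
    -- target: both sides equal the ascending chunk list
    have goalB : ((((PySem.List.pyRange (M * limit) 0 (-limit)).foldl
          (fun (st : List (Int × Int) × Int) s => (st.1 ++ [(s, st.2)], s - 1)) ([], page - 1)).1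
        ++ [(0, ((PySem.List.pyRange (M * limit) 0 (-limit)).foldl
          (fun (st : List (Int × Int) × Int) s => (st.1 ++ [(s, st.2)], s - 1)) ([], page - 1)).2)]).reverse)
        = (List.range (Mn + 1)).map
            (fun (x : Nat) => (limit * (x : Int), if x = Mn then page - 1 else limit * ((x : Int) + 1) - 1)) := by
      rw [hMcast, pyRange_down limit hl Mn]
      simp only [foldB limit Mn [] (page - 1)]
      simp only [List.reverse_append, List.reverse_reverse, List.nil_append,
        List.reverse_singleton, List.singleton_append]
      rw [List.range_succ_eq_map, List.map_cons]
      congr 1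
      · rcases Nat.eq_zero_or_pos Mn with h0 | hpos
        · rw [if_pos h0, if_pos (by omega : 0 = Mn)]
          norm_num
        · rw [if_neg (by omega), if_neg (by omega : ¬ 0 = Mn)]
          norm_num
      · rw [List.map_map]
        apply List.map_congr_left
        intro j hj
        simp only [Function.comp_apply, Nat.succ_eq_add_one]
        by_cases hje : j + 1 = Mn
        · rw [if_pos hje, if_pos hje]
          simp only [Prod.mk.injEq]
          refine ⟨by push_cast; ring, by trivial⟩
        · rw [if_neg hje, if_neg hje]
          simp only [Prod.mk.injEq]
          refine ⟨by push_cast; ring, by push_cast; ring⟩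
    simp only [goalB]
    rw [splitPageA_map]
    rw [PySem.List.pyRange_one, List.map_map]
    have hlen : (n - 0).toNat = Mn + 1 := by omega
    rw [hlen]
    apply List.map_congr_left
    intro y hy
    have hylt : y < Mn + 1 := List.mem_range.mp hy
    simp only [Function.comp_apply, zero_add]
    have hn1 : n - 1 = ((Mn : Int)) := by omega
    rw [hn1]
    by_cases hye : y = Mn
    · subst hye
      simp
    · have h1 : (((y : Nat) : Int) == ((Mn : Nat) : Int)) = false := by
        simp only [beq_eq_false_iff_ne, ne_eq, Int.natCast_inj]
        exact hye
      rw [h1, if_neg hye]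
      simp
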